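-- pv_equiv track=rewrite | github.com/python273/vk_api | vk_api/audio_url_decoder.py | vk_o
-- ===== SOURCE A (Python) =====
-- VK_STR = "abcdefghijklmnopqrstuvwxyzABCDEFGHIJKLMN0PQRSTUVWXYZO123456789+/="
--
-- def vk_o(string):
--     result = []
--     index2 = 0
--
--     for s in string:
--         sym_index = VK_STR.find(s)
--
--         if sym_index != -1:
--             if index2 % 4 != 0:
--                 i = (i << 6) + sym_index
--             else:
--                 i = sym_index
--
--             if index2 % 4 != 0:
--                 index2 += 1
--                 shift = -2 * index2 & 6
--                 result += [chr(0xFF & (i >> shift))]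
--             else:
--                 index2 += 1
--
--     return ''.join(result)
-- ===== SOURCE B (Python) =====
-- VK_STR = "abcdefghijklmnopqrstuvwxyzABCDEFGHIJKLMN0PQRSTUVWXYZO123456789+/="
--
-- def vk_o(string):
--     # Phase 1: map every character to its VK_STR value, dropping invalid ones.
--     vals = [v for v in (VK_STR.find(c) for c in string) if v != -1]
--     # Phase 2: decode the value list in chunks of 4, emitting len(chunk)-1 bytes.
--     out = []
--     for k in range(0, len(vals), 4):
--         g = vals[k:k + 4]
--         g0 = g[0]
--         g1 = g[1] if len(g) > 1 else 0
--         g2 = g[2] if len(g) > 2 else 0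
--         g3 = g[3] if len(g) > 3 else 0
--         bytes3 = [((g0 << 2) + (g1 >> 4)) & 0xFF,
--                   ((g1 << 4) + (g2 >> 2)) & 0xFF,
--                   ((g2 << 6) + g3) & 0xFF]
--         out.extend(chr(b) for b in bytes3[:len(g) - 1])
--     return ''.join(out)
-- ===== Notes on version B (the rewrite author's own statement) =====
-- stated objective: alternative
-- what changed: Replaced A's single-pass running bit-accumulator (state i/index2/shift updated per character) by a two-phase build-then-chunk decode: first map every character to its VK_STR value and drop invalid ones, then decode that value list in slices of 4, computing the up-to-3 output bytes of each slice directly by the base64 formulas.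
import Mathlib
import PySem

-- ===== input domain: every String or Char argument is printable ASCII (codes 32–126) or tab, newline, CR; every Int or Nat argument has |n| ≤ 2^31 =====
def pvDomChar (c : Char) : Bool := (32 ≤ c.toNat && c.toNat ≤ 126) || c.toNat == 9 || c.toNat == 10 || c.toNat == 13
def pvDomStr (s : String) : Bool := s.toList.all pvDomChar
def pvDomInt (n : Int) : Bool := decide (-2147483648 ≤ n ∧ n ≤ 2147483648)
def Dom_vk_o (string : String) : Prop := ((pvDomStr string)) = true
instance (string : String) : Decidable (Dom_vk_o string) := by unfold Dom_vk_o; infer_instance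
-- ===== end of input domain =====

-- B replaces A's incremental running-accumulator pass by a two-phase build-then-chunk
-- decomposition (map/filter to 6-bit values, then decode in slices of 4); objective: alternative.

-- shared module constant (both Pythons read the same module-level VK_STR)
def pvVkStr : String := "abcdefghijklmnopqrstuvwxyzABCDEFGHIJKLMN0PQRSTUVWXYZO123456789+/="

-- VK_STR.find(c) — both Pythons call exactly this
def pvVkFind (c : Char) : Int := PySem.Str.find pvVkStr (String.singleton c)

-- ===== PORT A =====
-- loop body of A, on state (result, index2, i).
-- Exactness notes: Python 'i << 6' on int = i * 64; 'i >> shift' = floor division by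
-- 2^shift; '0xFF & x' = x mod 256 (two's complement AND with a positive mask);
-- '-2 * index2 & 6' = (-2 * index2) mod 8, since that mod-8 value is even and ≤ 6.
def vkOStep (st : List Char × Nat × Int) (s : Char) : List Char × Nat × Int :=
  let sym := pvVkFind s
  if sym ≠ -1 then
    let i := if st.2.1 % 4 ≠ 0 then st.2.2 * 64 + sym else sym
    if st.2.1 % 4 ≠ 0 then
      let index2 := st.2.1 + 1
      let shift := PySem.Int.mod (-2 * (index2 : Int)) 8
      (st.1 ++ [Char.ofNat ((PySem.Int.mod (PySem.Int.floordiv i (2 ^ shift.toNat)) 256).toNat)],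
       index2, i)
    else (st.1, st.2.1 + 1, i)
  else st

def vk_o (string : String) : String :=
  String.ofList ((string.toList.foldl vkOStep ([], 0, 0)).1)

-- ===== PORT B =====
-- the three base64 bytes of Source B: chr(((g0<<2)+(g1>>4)) & 0xFF), etc.
def pvB1 (g0 g1 : Int) : Char :=
  Char.ofNat ((PySem.Int.mod (g0 * 4 + PySem.Int.floordiv g1 16) 256).toNat)
def pvB2 (g1 g2 : Int) : Char :=
  Char.ofNat ((PySem.Int.mod (g1 * 16 + PySem.Int.floordiv g2 4) 256).toNat)
def pvB3 (g2 g3 : Int) : Char :=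
  Char.ofNat ((PySem.Int.mod (g2 * 64 + g3) 256).toNat)

-- Source B's 'for k in range(0, len(vals), 4)' slice loop, as structural 4-chunk recursion;
-- a chunk of length L contributes bytes3[:L-1].
def pvDecodeChunks : List Int → List Char
  | [] => []
  | [_] => []
  | [g0, g1] => [pvB1 g0 g1]
  | [g0, g1, g2] => [pvB1 g0 g1, pvB2 g1 g2]
  | g0 :: g1 :: g2 :: g3 :: rest => pvB1 g0 g1 :: pvB2 g1 g2 :: pvB3 g2 g3 :: pvDecodeChunks rest

def vk_o_alt (string : String) : String :=
  String.ofList (pvDecodeChunks ((string.toList.map pvVkFind).filter (fun v => v ≠ -1)))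

-- ===== PRECONDITION & SPEC =====
def Spec_vk_o (string : String) (out : String) : Prop := out = vk_o_alt string
instance (string : String) (out : String) : Decidable (Spec_vk_o string out) := by
  unfold Spec_vk_o; infer_instance

-- ===== CLAIM (what is proved, stated in full; the proofs are below) =====
def Claim_equal_vk_o : Prop := ∀ (string : String), Dom_vk_o string → Spec_vk_o string (vk_o string)

-- ===== LEMMAS AND PROOFS =====

-- A's loop body restricted to valid symbols (sym ≠ -1), with the lets inlined
def vkVStep (st : List Char × Nat × Int) (sym : Int) : List Char × Nat × Int :=
  if st.2.1 % 4 ≠ 0 then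
    (st.1 ++ [Char.ofNat ((PySem.Int.mod (PySem.Int.floordiv (st.2.2 * 64 + sym)
        (2 ^ ((PySem.Int.mod (-2 * ((st.2.1 + 1 : Nat) : Int)) 8).toNat))) 256).toNat)],
     st.2.1 + 1, st.2.2 * 64 + sym)
  else (st.1, st.2.1 + 1, sym)

lemma vkOStep_eq (st : List Char × Nat × Int) (s : Char) :
    vkOStep st s = if pvVkFind s ≠ -1 then vkVStep st (pvVkFind s) else st := by
  simp only [vkOStep, vkVStep]
  by_cases h : pvVkFind s = -1 <;> by_cases h2 : st.2.1 % 4 = 0 <;> simp [h, h2]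

-- A's fold over the raw characters equals the valid-symbol fold over the filtered values
lemma foldl_step_filter (l : List Char) (st : List Char × Nat × Int) :
    l.foldl vkOStep st = ((l.map pvVkFind).filter (fun v => v ≠ -1)).foldl vkVStep st := by
  induction l generalizing st with
  | nil => rfl
  | cons c t ih =>
      by_cases h : pvVkFind c = -1 <;>
        simp [List.foldl, vkOStep_eq, h, ih]

-- the bytes A emits equal B's bytes (in ediv/emod form, as simp normalizes them)
lemma byte1_eq (g0 g1 : Int) :
    Char.ofNat (((g0 * 64 + g1) / 16 % 256).toNat) = pvB1 g0 g1 := by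
  unfold pvB1
  rw [PySem.Int.mod_eq_emod_of_pos (by norm_num),
      PySem.Int.floordiv_eq_ediv_of_pos (by norm_num)]
  congr 2
  omega

lemma byte2_eq (g0 g1 g2 : Int) :
    Char.ofNat ((((g0 * 64 + g1) * 64 + g2) / 4 % 256).toNat) = pvB2 g1 g2 := by
  unfold pvB2
  rw [PySem.Int.mod_eq_emod_of_pos (by norm_num),
      PySem.Int.floordiv_eq_ediv_of_pos (by norm_num)]
  congr 2
  omega

lemma byte3_eq (g0 g1 g2 g3 : Int) :
    Char.ofNat (((((g0 * 64 + g1) * 64 + g2) * 64 + g3) % 256).toNat) = pvB3 g2 g3 := by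
  unfold pvB3
  rw [PySem.Int.mod_eq_emod_of_pos (by norm_num)]
  congr 2
  omega

-- main invariant: from a state whose counter is a multiple of 4, A's valid-symbol fold
-- appends exactly B's chunk decode of the remaining values
lemma foldV_eq (vals : List Int) : ∀ (res : List Char) (n : Nat) (i : Int), n % 4 = 0 →
    (vals.foldl vkVStep (res, n, i)).1 = res ++ pvDecodeChunks vals := by
  induction vals using pvDecodeChunks.induct with
  | case1 => intro res n i hn; simp [pvDecodeChunks]
  | case2 g0 =>
      intro res n i hn
      simp [List.foldl, vkVStep, pvDecodeChunks, hn]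
  | case3 g0 g1 =>
      intro res n i hn
      have h1 : (n + 1) % 4 ≠ 0 := by omega
      have s4 : (-(2 * ((n : Int) + 1 + 1)) % 8) = 4 := by omega
      simp [List.foldl, vkVStep, hn, h1, pvDecodeChunks, s4, byte1_eq]
  | case4 g0 g1 g2 =>
      intro res n i hn
      have h1 : (n + 1) % 4 ≠ 0 := by omega
      have h2 : (n + 1 + 1) % 4 ≠ 0 := by omega
      have s4 : (-(2 * ((n : Int) + 1 + 1)) % 8) = 4 := by omega
      have s2 : (-(2 * ((n : Int) + 1 + 1 + 1)) % 8) = 2 := by omega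
      simp [List.foldl, vkVStep, hn, h1, h2, pvDecodeChunks, s4, s2, byte1_eq, byte2_eq]
  | case5 g0 g1 g2 g3 rest ih =>
      intro res n i hn
      have h1 : (n + 1) % 4 ≠ 0 := by omega
      have h2 : (n + 1 + 1) % 4 ≠ 0 := by omega
      have h3 : (n + 1 + 1 + 1) % 4 ≠ 0 := by omega
      have h4 : (n + 1 + 1 + 1 + 1) % 4 = 0 := by omega
      have s4 : (-(2 * ((n : Int) + 1 + 1)) % 8) = 4 := by omega
      have s2 : (-(2 * ((n : Int) + 1 + 1 + 1)) % 8) = 2 := by omega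
      have s0 : (-(2 * ((n : Int) + 1 + 1 + 1 + 1)) % 8) = 0 := by omega
      simp [List.foldl, vkVStep, hn, h1, h2, h3, pvDecodeChunks, s4, s2, s0,
        byte1_eq, byte2_eq, byte3_eq, ih _ _ _ h4]

-- ===== VERDICT (by name: the statement is the Claim_ definition above) =====
theorem vk_o_spec : Claim_equal_vk_o := by
  intro s _
  unfold Spec_vk_o vk_o vk_o_alt
  rw [foldl_step_filter, foldV_eq _ [] 0 0 rfl]
  rfl
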